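-- pv_equiv track=rewrite | github.com/Matvey-Kuk/RomanNumerals | Number.py | convert_to_sorted_form
-- ===== SOURCE A (Python) =====
-- def convert_to_sorted_form(digits):
--     #Сортирует цифры в числе
--     result = ''
--     sorting_rules = ['C', 'L', 'X', 'V', 'I']
--     number_of_digits = {}
--     for digit in digits:
--         if digit in number_of_digits:
--             number_of_digits[digit] += 1
--         else:
--             number_of_digits[digit] = 1
--     for rule in sorting_rules:
--         if rule in number_of_digits:
--             for a in range(0, number_of_digits[rule]):
--                 result += rule
--     return result
-- ===== SOURCE B (Python) =====
-- def convert_to_sorted_form(digits):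
--     # Sort-by-priority: keep the known roman digits, sort them by rank in 'CLXVI', join.
--     return ''.join(sorted((d for d in digits if d in 'CLXVI'), key='CLXVI'.index))
-- ===== Notes on version B (the rewrite author's own statement) =====
-- stated objective: idiomatic
-- what changed: Replaces the count-dictionary plus emit loops with a single filter-then-stable-sort keyed by each symbol's rank in the fixed priority order of the five roman digits, joined into one string.
import Mathlib
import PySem

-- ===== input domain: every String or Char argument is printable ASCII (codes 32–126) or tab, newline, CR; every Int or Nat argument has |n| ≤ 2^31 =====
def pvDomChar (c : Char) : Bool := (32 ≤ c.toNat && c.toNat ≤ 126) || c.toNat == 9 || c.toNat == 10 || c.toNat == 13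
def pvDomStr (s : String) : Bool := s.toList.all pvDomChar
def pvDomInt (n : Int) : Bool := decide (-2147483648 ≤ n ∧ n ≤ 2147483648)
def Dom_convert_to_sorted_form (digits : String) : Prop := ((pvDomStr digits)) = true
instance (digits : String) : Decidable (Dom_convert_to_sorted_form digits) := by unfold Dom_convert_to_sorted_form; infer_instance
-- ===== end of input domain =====

-- B re-sorts the kept roman digits by a key sort instead of counting and re-emitting; return values proved equal on all inputs.

-- ===== PORT A =====
def convert_to_sorted_form (digits : String) : String :=
  let result : String := ""
  let sorting_rules : List Char := ['C', 'L', 'X', 'V', 'I']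
  let number_of_digits : PySem.Dict Char Int :=
    digits.toList.foldl (fun d digit =>
      if d.contains digit then d.modify digit 0 (· + 1) else d.insert digit 1)
      PySem.Dict.empty
  sorting_rules.foldl (fun result rule =>
    if number_of_digits.contains rule then
      (PySem.List.pyRange 0 (number_of_digits.getD rule 0) 1).foldl
        (fun result _ => result.push rule) result
    else result) result

-- ===== PORT B =====
-- ''.join(sorted((d for d in digits if d in 'CLXVI'), key='CLXVI'.index)).
-- 'CLXVI'.index never raises here since the generator keeps only those five chars,
-- so it is ported as PySem.Chars.find (same value on the filtered domain); exact.
def convert_to_sorted_form_alt (digits : String) : String :=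
  String.ofList (PySem.List.sorted
    (digits.toList.filter (fun d => PySem.Chars.isIn [d] ['C', 'L', 'X', 'V', 'I']))
    (fun d => PySem.Chars.find ['C', 'L', 'X', 'V', 'I'] [d]))

-- ===== PRECONDITION & SPEC =====
def Spec_convert_to_sorted_form (digits : String) (out : String) : Prop := out = convert_to_sorted_form_alt digits
instance (digits : String) (out : String) : Decidable (Spec_convert_to_sorted_form digits out) := by unfold Spec_convert_to_sorted_form; infer_instance

-- ===== CLAIM (what is proved, stated in full; the proofs are below) =====
def Claim_equal_convert_to_sorted_form : Prop := ∀ (digits : String), Dom_convert_to_sorted_form digits → Spec_convert_to_sorted_form digits (convert_to_sorted_form digits)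

-- ===== LEMMAS AND PROOFS =====

-- The canonical result: each of the five symbols repeated as often as it occurs, in priority order.
def pvCanon (l : List Char) : List Char :=
  List.replicate (l.count 'C') 'C' ++ (List.replicate (l.count 'L') 'L' ++
  (List.replicate (l.count 'X') 'X' ++ (List.replicate (l.count 'V') 'V' ++
   List.replicate (l.count 'I') 'I')))

-- ---- A side ----

theorem pv_foldA_contains (l : List Char) (v : Char) : ∀ d : PySem.Dict Char Int,
    (l.foldl (fun d digit => if d.contains digit then d.modify digit 0 (· + 1) else d.insert digit 1) d).contains v
      = (l.contains v || d.contains v) := by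
  induction l with
  | nil => simp
  | cons x t ih =>
      intro d
      simp only [List.foldl_cons]
      rw [ih]
      have hstep : ((if d.contains x = true then d.modify x 0 (· + 1) else d.insert x 1)).contains v
          = (v == x || d.contains v) := by
        by_cases h : d.contains x = true
        · rw [if_pos h, PySem.Dict.contains_modify]
        · rw [if_neg h, PySem.Dict.contains_insert]
      rw [hstep]
      by_cases hv : v = x
      · subst hv; simp
      · rw [beq_eq_false_iff_ne.mpr hv]
        simp [List.contains_cons, hv, beq_eq_false_iff_ne.mpr (Ne.symm hv)]

theorem pv_foldA_getD (l : List Char) (v : Char) : ∀ d : PySem.Dict Char Int,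
    (l.foldl (fun d digit => if d.contains digit then d.modify digit 0 (· + 1) else d.insert digit 1) d).getD v 0
      = d.getD v 0 + (l.count v : Int) := by
  induction l with
  | nil => simp
  | cons x t ih =>
      intro d
      simp only [List.foldl_cons]
      rw [ih]
      have hstep : ((if d.contains x = true then d.modify x 0 (· + 1) else d.insert x 1)).getD v 0
          = d.getD v 0 + (if v = x then 1 else 0) := by
        by_cases h : d.contains x = true
        · rw [if_pos h, PySem.Dict.getD_modify]
          by_cases hv : v = x
          · subst hv; simp
          · simp [hv]
        · rw [if_neg h]
          by_cases hv : v = x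
          · subst hv
            rw [PySem.Dict.getD_insert_self, PySem.Dict.getD_of_not_contains _ _ (by simpa using h)]
            simp
          · rw [PySem.Dict.getD_insert_of_ne _ _ _ (by simpa using hv)]
            simp [hv]
      rw [hstep]
      by_cases hv : v = x
      · subst hv; simp [List.count_cons]; push_cast; ring
      · simp [List.count_cons, hv, beq_eq_false_iff_ne.mpr (Ne.symm hv)]

theorem pv_push_fold {α : Type} (xs : List α) (c : Char) : ∀ r : String,
    xs.foldl (fun s _ => s.push c) r = String.ofList (r.toList ++ List.replicate xs.length c) := by
  induction xs with
  | nil => intro r; simp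
  | cons x t ih =>
      intro r
      simp [List.foldl_cons, ih, List.replicate_succ]

theorem pv_pyRange_len (n : Nat) : (PySem.List.pyRange 0 (n : Int) 1).length = n := by
  rw [PySem.List.pyRange_of_pos _ _ (by norm_num)]
  simp
  omega

theorem pv_step_eq (l : List Char) (nd : PySem.Dict Char Int)
    (hc : ∀ v, nd.contains v = l.contains v)
    (hg : ∀ v, nd.getD v 0 = (l.count v : Int)) (r : String) (rule : Char) :
    (if nd.contains rule then
        (PySem.List.pyRange 0 (nd.getD rule 0) 1).foldl (fun s _ => s.push rule) r
      else r)
      = String.ofList (r.toList ++ List.replicate (l.count rule) rule) := by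
  rw [hc rule, hg rule]
  by_cases h : l.contains rule = true
  · rw [if_pos h, pv_push_fold, pv_pyRange_len]
  · have hz : l.count rule = 0 := by
      simp only [List.contains_eq_mem, decide_eq_true_eq] at h
      exact List.count_eq_zero_of_not_mem (by simpa using h)
    rw [if_neg h, hz]
    simp

theorem pv_A_eq (digits : String) :
    convert_to_sorted_form digits = String.ofList (pvCanon digits.toList) := by
  have hc := pv_foldA_contains digits.toList
  have hg := pv_foldA_getD digits.toList
  simp only [convert_to_sorted_form]
  simp only [List.foldl_cons, List.foldl_nil]
  rw [pv_step_eq digits.toList _ (fun v => by simp [hc v]) (fun v => by simp [hg v]),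
      pv_step_eq digits.toList _ (fun v => by simp [hc v]) (fun v => by simp [hg v]),
      pv_step_eq digits.toList _ (fun v => by simp [hc v]) (fun v => by simp [hg v]),
      pv_step_eq digits.toList _ (fun v => by simp [hc v]) (fun v => by simp [hg v]),
      pv_step_eq digits.toList _ (fun v => by simp [hc v]) (fun v => by simp [hg v])]
  simp [pvCanon]

-- ---- B side ----

theorem pv_find_eval (x : Char) : PySem.Chars.find ['C','L','X','V','I'] [x] =
    if x = 'C' then 0 else if x = 'L' then 1 else if x = 'X' then 2
    else if x = 'V' then 3 else if x = 'I' then 4 else -1 := by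
  simp [PySem.Chars.find, PySem.Chars.find.go, List.isPrefixOf]

theorem pv_isIn_eval (x : Char) : PySem.Chars.isIn [x] ['C','L','X','V','I']
    = decide (x ∈ (['C','L','X','V','I'] : List Char)) := by
  simp only [PySem.Chars.isIn, pv_find_eval]
  split_ifs <;> simp_all

theorem pv_insertBy_skip (b : Char → Char → Bool) (x c : Char) (h : b x c = false)
    (n : Nat) (rest : List Char) :
    PySem.List.insertBy b x (List.replicate n c ++ rest)
      = List.replicate n c ++ PySem.List.insertBy b x rest := by
  induction n with
  | zero => simp
  | succ n ih => simp [List.replicate_succ, PySem.List.insertBy, h, ih]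

theorem pv_insertBy_front (b : Char → Char → Bool) (x : Char) (ys : List Char)
    (h : ∀ y ∈ ys, b x y = true) :
    PySem.List.insertBy b x ys = x :: ys := by
  cases ys with
  | nil => simp [PySem.List.insertBy]
  | cons y t => simp [PySem.List.insertBy, h y (by simp)]

theorem pv_count_append_ne (l : List Char) (x c : Char) (h : c ≠ x) :
    (l ++ [x]).count c = l.count c := by
  simp [List.count_append, List.count_singleton, h]
  exact fun hh => h hh.symm

theorem pv_count_append_self (l : List Char) (x : Char) :
    (l ++ [x]).count x = l.count x + 1 := by
  simp

theorem pv_insert_canon (l : List Char) (x : Char)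
    (hx : x ∈ (['C','L','X','V','I'] : List Char)) :
    PySem.List.insertBy
        (fun a b => decide (PySem.Chars.find ['C','L','X','V','I'] [a]
          < PySem.Chars.find ['C','L','X','V','I'] [b])) x (pvCanon l)
      = pvCanon (l ++ [x]) := by
  fin_cases hx
  · -- x = 'C'
    unfold pvCanon
    rw [pv_insertBy_skip _ _ _ (by decide),
        pv_insertBy_front _ _ _ (by
          intro y hy
          simp only [List.mem_append, List.mem_replicate] at hy
          rcases hy with ⟨-, rfl⟩ | ⟨-, rfl⟩ | ⟨-, rfl⟩ | ⟨-, rfl⟩ <;> decide),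
        pv_count_append_self,
        pv_count_append_ne _ _ _ (by decide), pv_count_append_ne _ _ _ (by decide),
        pv_count_append_ne _ _ _ (by decide), pv_count_append_ne _ _ _ (by decide)]
    simp [List.replicate_succ']
  · -- x = 'L'
    unfold pvCanon
    rw [pv_insertBy_skip _ _ _ (by decide), pv_insertBy_skip _ _ _ (by decide),
        pv_insertBy_front _ _ _ (by
          intro y hy
          simp only [List.mem_append, List.mem_replicate] at hy
          rcases hy with ⟨-, rfl⟩ | ⟨-, rfl⟩ | ⟨-, rfl⟩ <;> decide),
        pv_count_append_self,
        pv_count_append_ne _ _ _ (by decide), pv_count_append_ne _ _ _ (by decide),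
        pv_count_append_ne _ _ _ (by decide), pv_count_append_ne _ _ _ (by decide)]
    simp [List.replicate_succ']
  · -- x = 'X'
    unfold pvCanon
    rw [pv_insertBy_skip _ _ _ (by decide), pv_insertBy_skip _ _ _ (by decide),
        pv_insertBy_skip _ _ _ (by decide),
        pv_insertBy_front _ _ _ (by
          intro y hy
          simp only [List.mem_append, List.mem_replicate] at hy
          rcases hy with ⟨-, rfl⟩ | ⟨-, rfl⟩ <;> decide),
        pv_count_append_self,
        pv_count_append_ne _ _ _ (by decide), pv_count_append_ne _ _ _ (by decide),
        pv_count_append_ne _ _ _ (by decide), pv_count_append_ne _ _ _ (by decide)]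
    simp [List.replicate_succ']
  · -- x = 'V'
    unfold pvCanon
    rw [pv_insertBy_skip _ _ _ (by decide), pv_insertBy_skip _ _ _ (by decide),
        pv_insertBy_skip _ _ _ (by decide), pv_insertBy_skip _ _ _ (by decide),
        pv_insertBy_front _ _ _ (by
          intro y hy
          simp only [List.mem_replicate] at hy
          rcases hy with ⟨-, rfl⟩
          decide),
        pv_count_append_self,
        pv_count_append_ne _ _ _ (by decide), pv_count_append_ne _ _ _ (by decide),
        pv_count_append_ne _ _ _ (by decide), pv_count_append_ne _ _ _ (by decide)]
    simp [List.replicate_succ']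
  · -- x = 'I'
    unfold pvCanon
    rw [pv_insertBy_skip _ _ _ (by decide), pv_insertBy_skip _ _ _ (by decide),
        pv_insertBy_skip _ _ _ (by decide), pv_insertBy_skip _ _ _ (by decide),
        PySem.List.insertBy_of_forall_not_before _ _ _ (by
          intro y hy
          simp only [List.mem_replicate] at hy
          rcases hy with ⟨-, rfl⟩
          decide),
        pv_count_append_self,
        pv_count_append_ne _ _ _ (by decide), pv_count_append_ne _ _ _ (by decide),
        pv_count_append_ne _ _ _ (by decide), pv_count_append_ne _ _ _ (by decide)]
    simp [List.replicate_succ']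

theorem pv_sorted_filter_eq_canon (l : List Char) :
    PySem.List.sorted
        (l.filter (fun d => PySem.Chars.isIn [d] ['C','L','X','V','I']))
        (fun d => PySem.Chars.find ['C','L','X','V','I'] [d]) = pvCanon l := by
  induction l using List.reverseRecOn with
  | nil => simp [pvCanon, PySem.List.sorted]
  | append_singleton t x ih =>
      rw [PySem.List.sorted_eq_foldl_insertBy] at ih ⊢
      rw [List.filter_append]
      by_cases hx : PySem.Chars.isIn [x] ['C','L','X','V','I'] = true
      · simp only [List.filter_cons, List.filter_nil, hx, if_true, List.foldl_append,
          List.foldl_cons, List.foldl_nil, ih]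
        exact pv_insert_canon t x (by simpa [pv_isIn_eval] using hx)
      · have hmem : x ∉ (['C','L','X','V','I'] : List Char) := by
          simpa [pv_isIn_eval] using hx
        simp only [List.filter_cons, List.filter_nil, hx, Bool.false_eq_true, if_false,
          List.append_nil, ih]
        unfold pvCanon
        rw [pv_count_append_ne _ _ _ (by intro h; apply hmem; rw [← h]; decide),
            pv_count_append_ne _ _ _ (by intro h; apply hmem; rw [← h]; decide),
            pv_count_append_ne _ _ _ (by intro h; apply hmem; rw [← h]; decide),
            pv_count_append_ne _ _ _ (by intro h; apply hmem; rw [← h]; decide),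
            pv_count_append_ne _ _ _ (by intro h; apply hmem; rw [← h]; decide)]

theorem pv_B_eq (digits : String) :
    convert_to_sorted_form_alt digits = String.ofList (pvCanon digits.toList) := by
  unfold convert_to_sorted_form_alt
  rw [pv_sorted_filter_eq_canon]

-- ===== VERDICT (by name: the statement is the Claim_ definition above) =====
theorem convert_to_sorted_form_spec : Claim_equal_convert_to_sorted_form := by
  intro digits _
  show convert_to_sorted_form digits = convert_to_sorted_form_alt digits
  rw [pv_A_eq, pv_B_eq]
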